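-- pv_equiv track=rewrite | github.com/ExiledMender/ea_analyzer_tool | create_html.py | get_plugin_versions
-- ===== SOURCE A (Python) =====
-- def trim_version(version):
--     parts = version.split('.')
--     if len(parts) >= 4:
--         return f"{parts[0]}.{parts[1]}.{parts[3]}"
--     return version
--
-- def get_plugin_versions(plugins):
--     plugin_version_map = {
--         'Endpoint Protection': 'endpoint_protection',
--         'Active Response Shell': 'active_response_shell',
--         'Windows Remote Intrusion Detection and Prevention': 'brute_force_protection',
--         'Asset Manager': 'asset_manager',
--         'Endpoint Detection and Response': 'edr',
--     }
--
--     plugin_info = {key: trim_version(next((p.get('plugin_version', 'N/A') for p in plugins if p.get('product_name') == key), 'N/A')) for key in plugin_version_map}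
--     return plugin_info
-- ===== SOURCE B (Python) =====
-- def _trim(version):
--     parts = version.split('.')
--     if len(parts) >= 4:
--         a, b, _, d = parts[:4]
--         return '.'.join([a, b, d])
--     return version
--
-- def get_plugin_versions(plugins):
--     result = {
--         'Endpoint Protection': 'N/A',
--         'Active Response Shell': 'N/A',
--         'Windows Remote Intrusion Detection and Prevention': 'N/A',
--         'Asset Manager': 'N/A',
--         'Endpoint Detection and Response': 'N/A',
--     }
--     for p in reversed(plugins):
--         name = p.get('product_name')
--         if name in result:
--             result[name] = p.get('plugin_version', 'N/A')
--     return {k: _trim(v) for k, v in result.items()}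
-- ===== Notes on version B (the rewrite author's own statement) =====
-- stated objective: alternative
-- what changed: B replaces A's five independent first-match scans of plugins (one next(...) generator per key) with a result dict pre-filled with the five keys at 'N/A', a single reversed overwrite pass over plugins (first forward occurrence wins), and a final trimming pass over the dict items.
import Mathlib
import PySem

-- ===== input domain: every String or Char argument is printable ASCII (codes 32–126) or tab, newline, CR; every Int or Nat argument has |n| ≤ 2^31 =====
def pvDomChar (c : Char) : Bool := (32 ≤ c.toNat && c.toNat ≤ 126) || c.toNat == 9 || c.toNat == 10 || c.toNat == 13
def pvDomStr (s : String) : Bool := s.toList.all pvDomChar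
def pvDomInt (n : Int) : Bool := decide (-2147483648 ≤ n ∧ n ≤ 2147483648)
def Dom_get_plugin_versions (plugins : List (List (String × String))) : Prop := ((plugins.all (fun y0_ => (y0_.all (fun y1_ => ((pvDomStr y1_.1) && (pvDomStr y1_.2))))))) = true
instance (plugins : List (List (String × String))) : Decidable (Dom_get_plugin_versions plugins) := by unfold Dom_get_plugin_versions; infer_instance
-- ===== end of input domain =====

-- B pre-fills a result dict with the five keys at 'N/A' and makes one reversed overwrite
-- pass over plugins (so the first forward occurrence wins), then trims in a final pass
-- over the dict items, instead of A's five independent first-match scans (alternative structure).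

-- ===== PORT A =====
def pvTrimVersion (version : String) : String :=
  let parts := (PySem.Str.split? version ".").getD []  -- split? is some: sep "." is nonempty
  if 4 ≤ parts.length then
    PySem.List.pyGetD parts 0 "" ++ "." ++ PySem.List.pyGetD parts 1 "" ++ "." ++ PySem.List.pyGetD parts 3 ""
  else version

-- the generator expression 'next((p.get('plugin_version','N/A') for p in plugins if p.get('product_name') == key), 'N/A')'
def pvNextVersion (plugins : List (List (String × String))) (key : String) : String :=
  match plugins with
  | [] => "N/A"
  | p :: rest =>
    let d := PySem.Dict.ofList p
    if d.get? "product_name" = some key then d.getD "plugin_version" "N/A"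
    else pvNextVersion rest key

def pvKeysA : List String :=
  ["Endpoint Protection", "Active Response Shell",
   "Windows Remote Intrusion Detection and Prevention", "Asset Manager",
   "Endpoint Detection and Response"]

def get_plugin_versions (plugins : List (List (String × String))) : List (String × String) :=
  pvKeysA.map (fun key => (key, pvTrimVersion (pvNextVersion plugins key)))

-- ===== PORT B =====
-- B's _trim: destructure the first four parts, rejoin three of them with '.'.join
def pvTrimB (version : String) : String :=
  match (PySem.Str.split? version ".").getD [] with  -- split? is some: sep "." is nonempty
  | a :: b :: _ :: d :: _ => PySem.Str.join "." [a, b, d]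
  | _ => version

def pvInitB : PySem.Dict String String :=
  PySem.Dict.ofList
    [("Endpoint Protection", "N/A"), ("Active Response Shell", "N/A"),
     ("Windows Remote Intrusion Detection and Prevention", "N/A"), ("Asset Manager", "N/A"),
     ("Endpoint Detection and Response", "N/A")]

-- the body of B's 'for p in reversed(plugins)' loop
def pvStepB (result : PySem.Dict String String) (p : List (String × String)) : PySem.Dict String String :=
  match (PySem.Dict.ofList p).get? "product_name" with
  | some name =>
    if result.contains name then result.insert name ((PySem.Dict.ofList p).getD "plugin_version" "N/A") else result
  | none => result

def get_plugin_versions_alt (plugins : List (List (String × String))) : List (String × String) :=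
  let result := plugins.reverse.foldl pvStepB pvInitB
  result.items.map (fun kv => (kv.1, pvTrimB kv.2))

-- ===== PRECONDITION & SPEC =====
def Spec_get_plugin_versions (plugins : List (List (String × String))) (out : List (String × String)) : Prop := out = get_plugin_versions_alt plugins
instance (plugins : List (List (String × String))) (out : List (String × String)) : Decidable (Spec_get_plugin_versions plugins out) := by unfold Spec_get_plugin_versions; infer_instance

-- ===== CLAIM (what is proved, stated in full; the proofs are below) =====
def Claim_equal_get_plugin_versions : Prop := ∀ (plugins : List (List (String × String))), Dom_get_plugin_versions plugins → Spec_get_plugin_versions plugins (get_plugin_versions plugins)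

-- ===== LEMMAS AND PROOFS =====

-- the two trimmers agree
theorem pvTrimB_eq (v : String) : pvTrimB v = pvTrimVersion v := by
  unfold pvTrimB pvTrimVersion
  generalize (PySem.Str.split? v ".").getD [] = parts
  rcases parts with _ | ⟨a, _ | ⟨b, _ | ⟨c, _ | ⟨d, rest⟩⟩⟩⟩
  · simp
  · simp
  · simp
  · simp
  · have h0 : PySem.List.pyGetD (a :: b :: c :: d :: rest) (0:Int) "" = a := by simp [pysem]
    have h1 : PySem.List.pyGetD (a :: b :: c :: d :: rest) (1:Int) "" = b := by simp [pysem]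
    have h3 : PySem.List.pyGetD (a :: b :: c :: d :: rest) (3:Int) "" = d := by simp [pysem]
    simp only [List.length_cons]
    rw [if_pos (by omega), h0, h1, h3]
    simp [PySem.Str.join, PySem.Chars.join, ← String.toList_inj, List.intercalate]

-- reductions of B's loop body by the shape of p
theorem pvStepB_of_none (acc : PySem.Dict String String) (p : List (String × String))
    (hp : (PySem.Dict.ofList p).get? "product_name" = none) : pvStepB acc p = acc := by
  unfold pvStepB; rw [hp]

theorem pvStepB_of_some (acc : PySem.Dict String String) (p : List (String × String)) (name : String)
    (hp : (PySem.Dict.ofList p).get? "product_name" = some name) :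
    pvStepB acc p =
      if acc.contains name then acc.insert name ((PySem.Dict.ofList p).getD "plugin_version" "N/A") else acc := by
  unfold pvStepB; rw [hp]

-- B's loop never changes the key set (it only overwrites existing keys)
theorem pvFoldB_keys (l : List (List (String × String))) (d : PySem.Dict String String) :
    (l.foldr (fun p acc => pvStepB acc p) d).keys = d.keys := by
  induction l with
  | nil => rfl
  | cons p rest ih =>
    simp only [List.foldr_cons]
    rcases hp : (PySem.Dict.ofList p).get? "product_name" with _ | name
    · rw [pvStepB_of_none _ _ hp]; exact ih
    · rw [pvStepB_of_some _ _ _ hp]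
      by_cases hc : (rest.foldr (fun p acc => pvStepB acc p) d).contains name
      · rw [if_pos hc, PySem.Dict.keys_insert_of_contains _ _ hc, ih]
      · rw [if_neg hc]; exact ih

-- after B's reversed overwrite pass, each pre-existing key holds A's first-forward-match value
theorem pvFoldB_getD (l : List (List (String × String))) (d : PySem.Dict String String)
    (k : String) (hk : d.contains k = true) (h0 : d.getD k "N/A" = "N/A") :
    (l.foldr (fun p acc => pvStepB acc p) d).getD k "N/A" = pvNextVersion l k := by
  induction l with
  | nil => simpa [pvNextVersion] using h0
  | cons p rest ih =>
    simp only [List.foldr_cons]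
    have hck : (rest.foldr (fun p acc => pvStepB acc p) d).contains k = true := by
      rw [PySem.Dict.contains_eq_decide_mem_keys, pvFoldB_keys,
        ← PySem.Dict.contains_eq_decide_mem_keys]; exact hk
    rcases hp : (PySem.Dict.ofList p).get? "product_name" with _ | name
    · rw [pvStepB_of_none _ _ hp]
      rw [ih]
      simp [pvNextVersion, hp]
    · rw [pvStepB_of_some _ _ _ hp]
      by_cases hnk : name = k
      · subst hnk
        rw [if_pos hck, PySem.Dict.getD_insert_self]
        simp [pvNextVersion, hp]
      · have hgoal : (if (rest.foldr (fun p acc => pvStepB acc p) d).contains name = true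
            then (rest.foldr (fun p acc => pvStepB acc p) d).insert name ((PySem.Dict.ofList p).getD "plugin_version" "N/A")
            else rest.foldr (fun p acc => pvStepB acc p) d).getD k "N/A"
            = (rest.foldr (fun p acc => pvStepB acc p) d).getD k "N/A" := by
          by_cases hc : (rest.foldr (fun p acc => pvStepB acc p) d).contains name
          · rw [if_pos hc, PySem.Dict.getD_insert_of_ne _ _ _ (fun h => hnk (Eq.symm h))]
          · rw [if_neg hc]
        rw [hgoal, ih]
        simp [pvNextVersion, hp, hnk]

-- ===== VERDICT (by name: the statement is the Claim_ definition above) =====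
theorem get_plugin_versions_spec : Claim_equal_get_plugin_versions := by
  intro plugins _
  unfold Spec_get_plugin_versions get_plugin_versions get_plugin_versions_alt
  simp only [List.foldl_reverse]
  set fold := plugins.foldr (fun p acc => pvStepB acc p) pvInitB with hfold
  have hkeys : fold.keys = pvKeysA := by
    rw [hfold, pvFoldB_keys]; decide
  have hnd : fold.keys.Nodup := by rw [hkeys]; decide
  rw [PySem.Dict.items_eq_map_keys fold hnd "N/A", hkeys, List.map_map]
  apply List.map_congr_left
  intro key hkey
  have hc : pvInitB.contains key = true ∧ pvInitB.getD key "N/A" = "N/A" := by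
    fin_cases hkey <;> exact ⟨by decide, by decide⟩
  simp only [Function.comp]
  rw [hfold, pvFoldB_getD plugins pvInitB key hc.1 hc.2, pvTrimB_eq]
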